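-- pv_equiv track=rewrite | github.com/benedettacandelori/ADM4_group12 | functions.py | update_signature_matrix
-- ===== SOURCE A (Python) =====
-- def update_signature_matrix(characteristic_matrix):
--
--   ''' This function returns a list that corresponds to a row of the signature matrix
--   which has all hash_songs as columns.
--   Each row of signature matrix contains the value of row-index of the first value
--   equal to '1' in characteristic matrix that is given in input. '''
--
--   # create an empty array
--   perm_row = []
--   for j in range(len(characteristic_matrix[0])):
--     for i in range(len(characteristic_matrix)):
--       # serch the first value that is not equal to 0
--       if characteristic_matrix[i][j] == 1:
--         perm_row.append(i)
--         # for loop must stop when the first 1 has been found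
--         break
--   return perm_row
-- ===== SOURCE B (Python) =====
-- def update_signature_matrix(characteristic_matrix):
--     cols = len(characteristic_matrix[0])
--     sig = [None] * cols
--     for i, row in enumerate(characteristic_matrix):
--         sig = [i if s is None and row[j] == 1 else s for j, s in enumerate(sig)]
--     return [s for s in sig if s is not None]
-- ===== Notes on version B (the rewrite author's own statement) =====
-- stated objective: alternative
-- what changed: Replaces A's column-major nested scan (restarting over all rows for every column) by a single row-major pass that fills a per-column first-hit signature with a None sentinel, then filters out columns that never saw a 1.
import Mathlib
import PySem

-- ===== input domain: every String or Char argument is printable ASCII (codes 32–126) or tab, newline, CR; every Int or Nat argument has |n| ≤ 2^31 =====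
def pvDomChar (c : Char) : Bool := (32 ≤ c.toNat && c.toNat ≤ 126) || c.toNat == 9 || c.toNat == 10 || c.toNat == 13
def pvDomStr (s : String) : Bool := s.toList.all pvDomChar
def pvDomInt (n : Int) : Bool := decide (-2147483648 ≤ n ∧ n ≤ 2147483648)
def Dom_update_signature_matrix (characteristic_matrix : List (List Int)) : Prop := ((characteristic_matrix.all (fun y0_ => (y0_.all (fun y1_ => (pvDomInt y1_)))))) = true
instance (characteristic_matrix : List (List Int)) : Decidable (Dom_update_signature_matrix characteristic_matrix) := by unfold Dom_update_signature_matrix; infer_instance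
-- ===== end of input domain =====

-- B replaces A's column-major nested scan by a single row-major pass maintaining a
-- per-column first-hit signature (None sentinel), then filters out untouched columns.

-- ===== PORT A =====
-- inner 'for i in range(len(M))' with break: scan rows, return first row index with row[j] == 1
def aColScan (rows : List (List Int)) (j : Nat) (i : Int) : Option Int :=
  match rows with
  | [] => none
  | row :: rest =>
      if PySem.List.pyGet? row (j : Int) = some 1 then some i else aColScan rest j (i + 1)

def update_signature_matrix (characteristic_matrix : List (List Int)) : List Int :=
  (List.range ((PySem.List.pyGet? characteristic_matrix 0).getD []).length).foldl
    (fun perm_row j =>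
      match aColScan characteristic_matrix j 0 with
      | some i => perm_row ++ [i]
      | none => perm_row)
    []

-- ===== PORT B =====
-- one row of B's pass: '[i if s is None and row[j] == 1 else s for j, s in enumerate(sig)]'
-- (recursion over sig carrying the enumerate index j)
def bStep (i : Int) (row : List Int) (j : Nat) : List (Option Int) → List (Option Int)
  | [] => []
  | s :: rest =>
      (if s = none ∧ PySem.List.pyGet? row (j : Int) = some 1 then some i else s) ::
        bStep i row (j + 1) rest

-- 'for i, row in enumerate(characteristic_matrix)'
def bRows (rows : List (List Int)) (i : Int) (sig : List (Option Int)) : List (Option Int) :=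
  match rows with
  | [] => sig
  | row :: rest => bRows rest (i + 1) (bStep i row 0 sig)

def update_signature_matrix_alt (characteristic_matrix : List (List Int)) : List Int :=
  (bRows characteristic_matrix 0
    (List.replicate ((PySem.List.pyGet? characteristic_matrix 0).getD []).length none)).filterMap id

-- ===== PRECONDITION & SPEC =====
-- Pre_ excludes exactly the inputs on which the Python A raises IndexError: the empty
-- matrix (characteristic_matrix[0]) and ragged matrices where the column scan reaches a
-- row too short for the current column before any 1 has been found in that column.
def Pre_update_signature_matrix (characteristic_matrix : List (List Int)) : Prop :=
  characteristic_matrix ≠ [] ∧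
  ∀ j < (characteristic_matrix.headD []).length,
    ∀ i < characteristic_matrix.length,
      (∀ i' < i, ¬ ((characteristic_matrix.getD i' [])[j]? = some (1 : Int))) →
      j < (characteristic_matrix.getD i []).length
instance (characteristic_matrix : List (List Int)) : Decidable (Pre_update_signature_matrix characteristic_matrix) := by unfold Pre_update_signature_matrix; infer_instance

def pvWitness_update_signature_matrix : List (List Int) := [[1, 0], [0, 1]]

def Spec_update_signature_matrix (characteristic_matrix : List (List Int)) (out : List Int) : Prop := out = update_signature_matrix_alt characteristic_matrix
instance (characteristic_matrix : List (List Int)) (out : List Int) : Decidable (Spec_update_signature_matrix characteristic_matrix out) := by unfold Spec_update_signature_matrix; infer_instance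

-- ===== CLAIM (what is proved, stated in full; the proofs are below) =====
def Claim_equal_update_signature_matrix : Prop := ∀ (characteristic_matrix : List (List Int)), Dom_update_signature_matrix characteristic_matrix → Pre_update_signature_matrix characteristic_matrix → Spec_update_signature_matrix characteristic_matrix (update_signature_matrix characteristic_matrix)

-- ===== LEMMAS AND PROOFS =====

theorem bStep_length (i : Int) (row : List Int) (j : Nat) (sig : List (Option Int)) :
    (bStep i row j sig).length = sig.length := by
  induction sig generalizing j with
  | nil => rfl
  | cons s rest ih => simp [bStep, ih]

theorem bStep_get (i : Int) (row : List Int) (sig : List (Option Int)) :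
    ∀ (j k : Nat) (s : Option Int), sig[k]? = some s →
      (bStep i row j sig)[k]? =
        some (if s = none ∧ PySem.List.pyGet? row ((j + k : Nat) : Int) = some 1
              then some i else s) := by
  induction sig with
  | nil => intro j k s h; simp at h
  | cons t rest ih =>
      intro j k s h
      cases k with
      | zero => simp_all [bStep]
      | succ k =>
          simp only [List.getElem?_cons_succ] at h
          have := ih (j + 1) k s h
          simpa [bStep, Nat.add_assoc, Nat.add_comm 1 k] using this

theorem bRows_get (rows : List (List Int)) :
    ∀ (i : Int) (sig : List (Option Int)) (j : Nat) (s : Option Int), sig[j]? = some s →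
      (bRows rows i sig)[j]? = some (s.or (aColScan rows j i)) := by
  induction rows with
  | nil => intro i sig j s h; cases s <;> simp_all [bRows, aColScan, Option.or]
  | cons row rest ih =>
      intro i sig j s h
      have hstep := bStep_get i row sig 0 j s h
      simp only [Nat.zero_add] at hstep
      have := ih (i + 1) (bStep i row 0 sig) j _ hstep
      rw [bRows, this]
      cases s with
      | some v => simp [Option.or]
      | none =>
          by_cases hhit : row[j]? = some (1 : Int) <;>
            simp [aColScan, hhit, Option.or]

theorem bRows_length (rows : List (List Int)) (i : Int) (sig : List (Option Int)) :
    (bRows rows i sig).length = sig.length := by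
  induction rows generalizing i sig with
  | nil => rfl
  | cons row rest ih => simp [bRows, ih, bStep_length]

theorem bRows_replicate (rows : List (List Int)) (cols : Nat) :
    bRows rows 0 (List.replicate cols none) =
      (List.range cols).map (fun j => aColScan rows j 0) := by
  apply List.ext_getElem?
  intro j
  by_cases hj : j < cols
  · have h0 : (List.replicate cols (none : Option Int))[j]? = some none := by
      simp [hj]
    rw [bRows_get rows 0 _ j none h0]
    simp [List.getElem?_map, List.getElem?_range hj, Option.or]
  · have h1 : cols ≤ j := Nat.le_of_not_lt hj
    rw [List.getElem?_eq_none, List.getElem?_eq_none]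
    · simpa using h1
    · simpa [bRows_length] using h1

theorem foldl_match_filterMap (f : Nat → Option Int) :
    ∀ (l : List Nat) (init : List Int),
      l.foldl (fun perm j => match f j with | some i => perm ++ [i] | none => perm) init =
        init ++ l.filterMap f := by
  intro l
  induction l with
  | nil => intro init; simp
  | cons a t ih =>
      intro init
      cases hfa : f a <;> simp [List.foldl_cons, hfa, ih]

theorem update_signature_matrix_spec : Claim_equal_update_signature_matrix := by
  intro M _ _
  show update_signature_matrix M = update_signature_matrix_alt M
  unfold update_signature_matrix update_signature_matrix_alt
  rw [bRows_replicate, foldl_match_filterMap, List.filterMap_map]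
  simp
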